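-- pv_equiv track=rewrite | github.com/Louis-Gabriel-TM/computer_science | 4_classic_puzzles/4_1_with_arrays/count_unique_values.py | count_unique_values_with_pointers
-- ===== SOURCE A (Python) =====
-- def count_unique_values_with_pointers(arr):
--     # Time complexity of 'count_unique_values_with_pointers': O(n)
--     # Space compexity of 'count_unique_values_with_pointers': O(1)
--     if len(arr) > 1:
--         left = 0  # pointer from the beginning
--         left_scout = 1  # pointer looking for the next different value
--
--         while left_scout < len(arr):
--             if arr[left_scout] == arr[left]:
--                 left_scout += 1
--             else:
--                 left += 1
--                 arr[left] = arr[left_scout]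
--                 left_scout += 1
--
--         return left + 1
--
--     return len(arr)
-- ===== SOURCE B (Python) =====
-- def count_unique_values_with_pointers(arr):
--     # Subtractive counting: the number of unique values in a sorted array is
--     # its length minus the number of adjacent equal pairs. No mutation of arr
--     # (A compacts arr in place; only the return value is matched).
--     return len(arr) - sum(x == y for x, y in zip(arr, arr[1:]))
-- ===== Notes on version B (the rewrite author's own statement) =====
-- stated objective: simpler
-- what changed: Replaces A's two-pointer in-place compaction loop by a subtractive count: len(arr) minus the number of adjacent equal pairs (via zip), with no write-back/mutation; only the return value is claimed equal.
import Mathlib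
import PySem

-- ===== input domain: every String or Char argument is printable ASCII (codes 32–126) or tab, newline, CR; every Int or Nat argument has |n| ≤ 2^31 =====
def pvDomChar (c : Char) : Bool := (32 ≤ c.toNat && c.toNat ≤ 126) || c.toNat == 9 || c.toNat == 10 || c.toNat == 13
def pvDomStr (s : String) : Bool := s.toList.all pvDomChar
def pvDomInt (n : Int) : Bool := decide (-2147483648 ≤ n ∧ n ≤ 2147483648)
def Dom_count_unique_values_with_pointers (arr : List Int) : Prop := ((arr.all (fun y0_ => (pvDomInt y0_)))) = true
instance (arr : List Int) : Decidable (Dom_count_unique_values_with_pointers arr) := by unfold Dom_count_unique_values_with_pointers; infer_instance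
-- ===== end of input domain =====

-- B counts subtractively (length minus adjacent equal pairs) instead of A's
-- two-pointer in-place compaction (objective: simpler). A mutates arr in place,
-- B does not; only the RETURN value is proved equal here.

-- ===== PORT A =====
-- A's while loop: state is the (mutated) array and the `left` pointer,
-- `left_scout` is the recursion index. All indices A uses are in range, so
-- List.getD/List.set transcribe Python's arr[i] reads/writes exactly here.
def cuvLoopA (m : List Int) (left scout : Nat) : List Int × Nat :=
  if _h : scout < m.length then
    if m.getD scout 0 == m.getD left 0 then
      cuvLoopA m left (scout + 1)
    else
      cuvLoopA (m.set (left + 1) (m.getD scout 0)) (left + 1) (scout + 1)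
  else
    (m, left)
termination_by m.length - scout
decreasing_by
  · omega
  · simp only [List.length_set]; omega

def count_unique_values_with_pointers (arr : List Int) : Int :=
  if arr.length > 1 then
    ((cuvLoopA arr 0 1).2 : Int) + 1
  else
    (arr.length : Int)

-- ===== PORT B =====
-- Source B's `zip(arr, arr[1:])` is `arr.zip (arr.drop 1)`; `sum(x == y for ...)`
-- (Python bools summing as ints) is a foldl adding the 0/1 indicator.
def count_unique_values_with_pointers_alt (arr : List Int) : Int :=
  (arr.length : Int) -
    ((arr.zip (arr.drop 1)).foldl (fun s p => s + (if p.1 == p.2 then 1 else 0)) 0)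

-- ===== PRECONDITION & SPEC =====
def Spec_count_unique_values_with_pointers (arr : List Int) (out : Int) : Prop := out = count_unique_values_with_pointers_alt arr
instance (arr : List Int) (out : Int) : Decidable (Spec_count_unique_values_with_pointers arr out) := by unfold Spec_count_unique_values_with_pointers; infer_instance

-- ===== CLAIM (what is proved, stated in full; the proofs are below) =====
def Claim_equal_count_unique_values_with_pointers : Prop := ∀ (arr : List Int), Dom_count_unique_values_with_pointers arr → Spec_count_unique_values_with_pointers arr (count_unique_values_with_pointers arr)

-- ===== LEMMAS AND PROOFS =====

-- Reference count: number of values in the list differing from the previous one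
-- (previous value of the head is p).
def cdList (p : Int) : List Int → Nat
  | [] => 0
  | v :: t => (if v = p then 0 else 1) + cdList v t

-- A's loop: at state (m, left, scout) with left < scout ≤ |m| and m[left] the
-- last distinct value p, the final left pointer is left + cdList p (m.drop scout).
theorem cuvLoopA_eq (m : List Int) (left scout : Nat) (p : Int)
    (hs : scout ≤ m.length) (hl : left < scout) (hp : m.getD left 0 = p) :
    (cuvLoopA m left scout).2 = left + cdList p (m.drop scout) := by
  induction hn : m.length - scout using Nat.strong_induction_on generalizing m left scout p with
  | _ n ih =>
  rw [cuvLoopA]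
  by_cases h : scout < m.length
  · rw [dif_pos h]
    have hdrop : m.drop scout = m[scout] :: m.drop (scout + 1) :=
      List.drop_eq_getElem_cons h
    have hget : m.getD scout 0 = m[scout] := by
      simp [List.getD_eq_getElem?_getD, List.getElem?_eq_getElem h]
    by_cases he : (m.getD scout 0 == m.getD left 0) = true
    · rw [if_pos he]
      have hv : m[scout] = p := by
        have := beq_iff_eq.mp he; rw [hget] at this; rw [this, hp]
      rw [ih (m.length - (scout + 1)) (by omega) m left (scout + 1) p
          (by omega) (by omega) hp (rfl)]
      rw [hdrop, cdList, hv, if_pos rfl]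
      omega
    · rw [if_neg he]
      have hne : m[scout] ≠ p := by
        intro hc
        apply he
        rw [beq_iff_eq, hget, hc, hp]
      have hlen : (m.set (left + 1) (m.getD scout 0)).length = m.length := by
        simp
      rw [ih ((m.set (left + 1) (m.getD scout 0)).length - (scout + 1))
          (by omega)
          (m.set (left + 1) (m.getD scout 0)) (left + 1) (scout + 1) m[scout]
          (by omega) (by omega)
          (by
            rw [hget]
            have h1 : left + 1 < m.length := by omega
            simp [List.getD_eq_getElem?_getD, h1])
          (rfl)]
      have hds : (m.set (left + 1) (m.getD scout 0)).drop (scout + 1) = m.drop (scout + 1) := by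
        rw [List.drop_set]
        simp
        omega
      rw [hds, hdrop, cdList, if_neg hne]
      omega
  · rw [dif_neg h]
    have : m.drop scout = [] := List.drop_eq_nil_of_le (by omega)
    rw [this, cdList]
    simp

-- B's pair sum complements cdList: over the pairs of p::t the fold adds
-- exactly t.length - cdList p t to its accumulator.
theorem foldB_eq (t : List Int) (p : Int) (s : Int) :
    ((p :: t).zip t).foldl (fun s q => s + (if q.1 == q.2 then 1 else 0)) s
      + (cdList p t : Int) = s + (t.length : Int) := by
  induction t generalizing p s with
  | nil => simp [cdList]
  | cons v t ih =>
    simp only [List.zip_cons_cons, List.foldl_cons, cdList]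
    have := ih v (s + (if (p == v) = true then (1 : Int) else 0))
    by_cases hv : v = p
    · subst hv
      simp only [beq_self_eq_true, if_true, List.length_cons] at this ⊢
      push_cast at this ⊢
      omega
    · have h1 : (p == v) = false := by
        simp only [beq_eq_false_iff_ne]; intro hc; exact hv hc.symm
      simp only [h1, Bool.false_eq_true, if_false, if_neg hv, List.length_cons] at this ⊢
      push_cast at this ⊢
      omega

theorem cuv_eq (arr : List Int) :
    count_unique_values_with_pointers arr = count_unique_values_with_pointers_alt arr := by
  unfold count_unique_values_with_pointers count_unique_values_with_pointers_alt
  match arr with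
  | [] => simp
  | [v] => simp
  | v0 :: v1 :: rest =>
      have hlen : (v0 :: v1 :: rest).length > 1 := by simp
      rw [if_pos hlen]
      rw [cuvLoopA_eq (v0 :: v1 :: rest) 0 1 v0 (by simp) (by omega) (by simp)]
      have hzip := foldB_eq (v1 :: rest) v0 0
      simp only [List.drop_succ_cons, List.drop_zero, List.length_cons] at *
      push_cast at *
      omega

-- ===== VERDICT (by name: the statement is the Claim_ definition above) =====
theorem count_unique_values_with_pointers_spec : Claim_equal_count_unique_values_with_pointers := by
  intro arr _
  unfold Spec_count_unique_values_with_pointers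
  exact cuv_eq arr
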